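-- pv_equiv track=rewrite | github.com/adcerros/AIInOrganizations | divideYvenceras/DivideAndConquerExamen.py | _multiplos5
-- ===== SOURCE A (Python) =====
-- def _multiplos5(lista, start, end):
--     if start == end:
--         if lista[start] % 5 == 0:
--             return lista[start]
--         else:
--             return 0
--     else:
--         mid=(start+end)//2
--         return _multiplos5(lista, start, mid) + _multiplos5(lista, mid+1, end)
-- ===== SOURCE B (Python) =====
-- def _multiplos5(lista, start, end):
--     total = 0
--     i = start
--     while True:
--         if lista[i] % 5 == 0:
--             total += lista[i]
--         if i == end:
--             return total
--         i += 1
-- ===== Notes on version B (the rewrite author's own statement) =====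
-- stated objective: simpler
-- what changed: Replaced the divide-and-conquer recursive bisection (split at mid, recurse on both halves, add) with a single linear accumulator scan that walks one index from start to end.
import Mathlib
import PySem

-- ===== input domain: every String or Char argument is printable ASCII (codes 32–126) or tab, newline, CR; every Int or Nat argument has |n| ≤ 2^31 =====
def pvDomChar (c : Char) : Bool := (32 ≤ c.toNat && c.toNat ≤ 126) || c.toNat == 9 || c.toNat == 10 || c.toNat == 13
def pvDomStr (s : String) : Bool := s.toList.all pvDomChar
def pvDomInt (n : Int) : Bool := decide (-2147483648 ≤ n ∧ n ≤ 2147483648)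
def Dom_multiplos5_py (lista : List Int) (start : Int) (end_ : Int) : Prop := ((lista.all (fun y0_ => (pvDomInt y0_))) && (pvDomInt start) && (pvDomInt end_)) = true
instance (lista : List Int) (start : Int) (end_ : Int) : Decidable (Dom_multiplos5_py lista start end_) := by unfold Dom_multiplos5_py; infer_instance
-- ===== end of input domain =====

-- B replaces A's recursive bisection by a single linear accumulator scan from start to end (simpler, same cost).

-- ===== PORT A =====
-- Fuel-based transliteration of A's recursion; fuel (end_-start).toNat+1 is always
-- sufficient on Pre_ (each recursive call strictly shrinks end_-start), proved below.
def multiplos5Go : Nat → List Int → Int → Int → Int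
  | 0, _, _, _ => 0
  | fuel+1, lista, start, end_ =>
    if start = end_ then
      if PySem.Int.mod (PySem.List.pyGetD lista start 0) 5 = 0 then PySem.List.pyGetD lista start 0
      else 0
    else
      let mid := PySem.Int.floordiv (start + end_) 2
      multiplos5Go fuel lista start mid + multiplos5Go fuel lista (mid + 1) end_

def multiplos5_py (lista : List Int) (start : Int) (end_ : Int) : Int :=
  multiplos5Go ((end_ - start).toNat + 1) lista start end_

-- ===== PORT B =====
-- One iteration of B's 'while True' body on the state (i, total): Sum.inl at 'return total',
-- Sum.inr with the updated state otherwise.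
def multiplos5AltStep (lista : List Int) (end_ : Int) (st : Int × Int) : Sum Int (Int × Int) :=
  let x := PySem.List.pyGetD lista st.1 0
  let total := if PySem.Int.mod x 5 = 0 then st.2 + x else st.2
  if st.1 = end_ then Sum.inl total else Sum.inr (st.1 + 1, total)

-- The loop driver: iterate the step until it returns; fuel (end_-start).toNat+1 covers
-- every iteration the loop performs on Pre_, proved below.
def multiplos5AltLoop (lista : List Int) (end_ : Int) : Nat → Int × Int → Int
  | 0, st => st.2
  | n+1, st =>
    match multiplos5AltStep lista end_ st with
    | Sum.inl r => r
    | Sum.inr st' => multiplos5AltLoop lista end_ n st'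

def multiplos5_py_alt (lista : List Int) (start : Int) (end_ : Int) : Int :=
  multiplos5AltLoop lista end_ ((end_ - start).toNat + 1) (start, 0)

-- ===== PRECONDITION & SPEC =====
-- Pre_: start ≤ end_ (otherwise A recurses forever / B scans off the end) and every index of
-- [start, end_] is a valid Python index (otherwise both raise IndexError).
def Pre_multiplos5_py (lista : List Int) (start : Int) (end_ : Int) : Prop :=
  start ≤ end_ ∧ -(lista.length : Int) ≤ start ∧ end_ < (lista.length : Int)
instance (lista : List Int) (start : Int) (end_ : Int) : Decidable (Pre_multiplos5_py lista start end_) := by unfold Pre_multiplos5_py; infer_instance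

def pvWitness_multiplos5_py : List Int × Int × Int := ([5, 3, 10], 0, 2)

def Spec_multiplos5_py (lista : List Int) (start : Int) (end_ : Int) (out : Int) : Prop := out = multiplos5_py_alt lista start end_
instance (lista : List Int) (start : Int) (end_ : Int) (out : Int) : Decidable (Spec_multiplos5_py lista start end_ out) := by unfold Spec_multiplos5_py; infer_instance

-- ===== CLAIM (what is proved, stated in full; the proofs are below) =====
def Claim_equal_multiplos5_py : Prop := ∀ (lista : List Int) (start : Int) (end_ : Int), Dom_multiplos5_py lista start end_ → Pre_multiplos5_py lista start end_ → Spec_multiplos5_py lista start end_ (multiplos5_py lista start end_)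

-- ===== LEMMAS AND PROOFS =====

-- The range-sum both programs compute: Σ over i ∈ [start, end_] of (lista[i] if 5 ∣ lista[i] else 0).
def mult5Sum (lista : List Int) (start end_ : Int) : Int :=
  ((PySem.List.pyRange start (end_ + 1) 1).map
    (fun i => if PySem.Int.mod (PySem.List.pyGetD lista i 0) 5 = 0 then PySem.List.pyGetD lista i 0 else 0)).sum

lemma altLoop_eq_sum (lista : List Int) : ∀ (fuel : Nat) (i end_ total : Int),
    i ≤ end_ → (end_ - i).toNat < fuel →
    multiplos5AltLoop lista end_ fuel (i, total) = total + mult5Sum lista i end_ := by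
  intro fuel
  induction fuel with
  | zero => intro i end_ total _ h; omega
  | succ n ih =>
    intro i end_ total hle hf
    unfold mult5Sum
    rw [PySem.List.pyRange_one_cons (by omega : i < end_ + 1)]
    by_cases heq : i = end_
    · subst heq
      rw [PySem.List.pyRange_one_eq_nil (by omega)]
      simp only [multiplos5AltLoop, multiplos5AltStep, if_pos rfl]
      split_ifs <;> simp_all
    · simp only [multiplos5AltLoop, multiplos5AltStep, if_neg heq]
      split_ifs with h
      · rw [ih (i + 1) end_ _ (by omega) (by omega)]
        unfold mult5Sum
        simp only [List.map_cons, List.sum_cons, if_pos h]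
        ring
      · rw [ih (i + 1) end_ _ (by omega) (by omega)]
        unfold mult5Sum
        simp only [List.map_cons, List.sum_cons, if_neg h]
        ring

lemma alt_eq_sum (lista : List Int) (start end_ : Int) (h : start ≤ end_) :
    multiplos5_py_alt lista start end_ = mult5Sum lista start end_ := by
  unfold multiplos5_py_alt
  rw [altLoop_eq_sum lista _ start end_ 0 h (by omega)]
  ring

lemma sum_split (lista : List Int) (start m end_ : Int) (h1 : start ≤ m) (h2 : m ≤ end_) :
    mult5Sum lista start end_ = mult5Sum lista start m + mult5Sum lista (m + 1) end_ := by
  unfold mult5Sum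
  rw [PySem.List.pyRange_one_append start (m + 1) (end_ + 1) (by omega) (by omega)]
  simp

lemma go_eq_sum (lista : List Int) : ∀ (fuel : Nat) (start end_ : Int),
    start ≤ end_ → (end_ - start).toNat < fuel →
    multiplos5Go fuel lista start end_ = mult5Sum lista start end_ := by
  intro fuel
  induction fuel with
  | zero => intro start end_ _ h; omega
  | succ n ih =>
    intro start end_ hle hf
    by_cases heq : start = end_
    · subst heq
      simp only [multiplos5Go]
      unfold mult5Sum
      rw [PySem.List.pyRange_one_singleton]
      simp
    · have hlt : start < end_ := lt_of_le_of_ne hle heq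
      have hmid := PySem.Int.floordiv_two_mid_bounds (le_of_lt hlt)
      have hmlt : PySem.Int.floordiv (start + end_) 2 < end_ := by
        rw [PySem.Int.floordiv_lt_iff_lt_mul (by omega)]; omega
      simp only [multiplos5Go, if_neg heq]
      rw [ih start (PySem.Int.floordiv (start + end_) 2) (by omega) (by omega),
          ih (PySem.Int.floordiv (start + end_) 2 + 1) end_ (by omega) (by omega)]
      exact (sum_split lista start _ end_ (by omega) (by omega)).symm

-- ===== VERDICT (by name: the statement is the Claim_ definition above) =====
theorem multiplos5_py_spec : Claim_equal_multiplos5_py := by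
  intro lista start end_ _ hpre
  unfold Spec_multiplos5_py multiplos5_py
  rw [go_eq_sum lista _ start end_ hpre.1 (by omega), alt_eq_sum lista start end_ hpre.1]
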